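-- pv_equiv track=rewrite | github.com/GlycReSoft2/embed_tandem_ms_classifier | structure/sequence.py | sequence_tokenizer
-- ===== SOURCE A (Python) =====
-- def sequence_tokenizer(sequence):
--     state = "aa"
--     chunks = []
--     current_aa = ""
--     current_mod = ""
--     paren_level = 0
--     i = 0
--     while i < len(sequence):
--         next_char = sequence[i]
--         if next_char is "(":
--             if state == "aa":
--                 state = "mod"
--                 assert paren_level == 0
--                 paren_level += 1
--             elif state == "mod":
--                 paren_level += 1
--                 current_mod += next_char
--         elif next_char == ")":
--             if state == "aa":
--                 raise Exception("Invalid Sequence. ) found outside of modification.")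
--             elif state == "mod":
--                 paren_level -= 1
--                 if paren_level == 0:
--                     state = 'aa'
--                     new_chunk = [current_aa, current_mod]
--                     chunks.append(new_chunk)
--                     current_mod = ""
--                     current_aa = ""
--                 else:
--                     current_mod += next_char
--         elif state == "aa":
--             if(current_aa != ""):
--                 new_chunk = [current_aa, current_mod]
--                 chunks.append(new_chunk)
--                 current_mod = ""
--                 current_aa = ""
--             current_aa += next_char
--         elif state == "mod":
--             current_mod += next_char
--         else:
--             raise Exception("Unknown Tokenizer State", current_aa, current_mod, i, next_char)
--         i += 1
--     if current_aa != "":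
--         new_chunk = [current_aa, ""]
--         chunks.append(new_chunk)
--     return chunks
-- ===== SOURCE B (Python) =====
-- def sequence_tokenizer(sequence):
--     chunks = []
--     current_aa = ""
--     n = len(sequence)
--     i = 0
--     while i < n:
--         c = sequence[i]
--         if c == "(":
--             # find the matching close paren, counting depth over the interior
--             depth = 1
--             close = -1
--             j = i + 1
--             while j < n:
--                 if sequence[j] == "(":
--                     depth += 1
--                 elif sequence[j] == ")":
--                     depth -= 1
--                     if depth == 0:
--                         close = j
--                         break
--                 j += 1
--             if close == -1:
--                 break  # unclosed modification: discarded, only the final flush runs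
--             chunks.append([current_aa, sequence[i + 1:close]])
--             current_aa = ""
--             i = close + 1
--         elif c == ")":
--             raise Exception("Invalid Sequence. ) found outside of modification.")
--         else:
--             if current_aa != "":
--                 chunks.append([current_aa, ""])
--             current_aa = c
--             i += 1
--     if current_aa != "":
--         chunks.append([current_aa, ""])
--     return chunks
-- ===== Notes on version B (the rewrite author's own statement) =====
-- stated objective: simpler
-- what changed: Replaces A's five-variable aa/mod state machine with a top-level scan that, at each '(', runs an inner balanced-paren matcher and slices out the whole modification in one step (final flush and unclosed-mod discard kept).
import Mathlib
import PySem

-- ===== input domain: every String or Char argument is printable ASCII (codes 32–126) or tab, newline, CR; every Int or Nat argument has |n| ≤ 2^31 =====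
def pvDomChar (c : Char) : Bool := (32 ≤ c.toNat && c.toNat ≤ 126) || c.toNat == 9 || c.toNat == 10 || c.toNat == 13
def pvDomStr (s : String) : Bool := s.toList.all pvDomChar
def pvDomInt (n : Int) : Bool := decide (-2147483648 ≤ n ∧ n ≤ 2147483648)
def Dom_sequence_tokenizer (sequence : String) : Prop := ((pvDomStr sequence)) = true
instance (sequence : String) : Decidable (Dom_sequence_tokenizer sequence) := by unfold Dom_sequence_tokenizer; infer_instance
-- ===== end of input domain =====

-- B replaces A's five-variable state machine by an outer top-level scan with an inner
-- balanced-paren matcher that slices out each modification (objective: simpler; same cost).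

-- ===== PORT A =====
-- A's while-loop as structural recursion over the characters; state "aa"/"mod" is the
-- Bool inMod (the "Unknown Tokenizer State" branch is unreachable).  On the top-level ')'
-- the Python raises Exception("Invalid Sequence. ) found outside of modification.");
-- the port returns [] there (excluded by Pre_).
def seqTokA : List Char → Bool → List (List String) → String → String → Int → List (List String)
  | [], _, chunks, ca, _, _ =>
      if ca ≠ "" then chunks ++ [[ca, ""]] else chunks
  | c :: rest, inMod, chunks, ca, cm, pl =>
      if c = '(' then
        if !inMod then seqTokA rest true chunks ca cm (pl + 1)
        else seqTokA rest true chunks ca (cm.push c) (pl + 1)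
      else if c = ')' then
        if !inMod then []  -- Python raises here
        else if pl - 1 = 0 then seqTokA rest false (chunks ++ [[ca, cm]]) "" "" (pl - 1)
        else seqTokA rest true chunks ca (cm.push c) (pl - 1)
      else if !inMod then
        if ca ≠ "" then seqTokA rest false (chunks ++ [[ca, cm]]) ("".push c) "" pl
        else seqTokA rest false chunks (ca.push c) cm pl
      else seqTokA rest true chunks ca (cm.push c) pl

def sequence_tokenizer (sequence : String) : List (List String) :=
  seqTokA sequence.toList false [] "" "" 0

-- ===== PORT B =====
-- Source B's inner while-loop: scan for the close paren matching an already-open one at the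
-- given depth; returns the interior (the slice sequence[i+1:close]) and the characters
-- after the close, or none if unmatched.
def findClose : List Char → Int → String → Option (String × List Char)
  | [], _, _ => none
  | c :: rest, depth, acc =>
      if c = '(' then findClose rest (depth + 1) (acc.push c)
      else if c = ')' then
        if depth - 1 = 0 then some (acc, rest)
        else findClose rest (depth - 1) (acc.push c)
      else findClose rest depth (acc.push c)

theorem findClose_length : ∀ (l : List Char) (d : Int) (acc : String) (m : String)
    (r : List Char), findClose l d acc = some (m, r) → r.length < l.length := by
  intro l
  induction l with
  | nil => intro d acc m r h; simp [findClose] at h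
  | cons c rest ih =>
      intro d acc m r h
      simp only [findClose] at h
      split_ifs at h with h1 h2 h3
      · exact Nat.lt_succ_of_lt (ih _ _ _ _ h)
      · injection h with h'
        cases h'
        simp
      · exact Nat.lt_succ_of_lt (ih _ _ _ _ h)
      · exact Nat.lt_succ_of_lt (ih _ _ _ _ h)

-- Source B's outer while-loop.  The top-level ')' (where the Python raises) returns []
-- (excluded by Pre_); an unmatched '(' breaks out so only the final flush runs.
def seqTokB : List Char → List (List String) → String → List (List String)
  | [], chunks, ca => if ca ≠ "" then chunks ++ [[ca, ""]] else chunks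
  | c :: rest, chunks, ca =>
      if c = '(' then
        match h : findClose rest 1 "" with
        | none => if ca ≠ "" then chunks ++ [[ca, ""]] else chunks
        | some (m, r) => seqTokB r (chunks ++ [[ca, m]]) ""
      else if c = ')' then []  -- Python raises here
      else seqTokB rest (if ca ≠ "" then chunks ++ [[ca, ""]] else chunks) (String.ofList [c])
termination_by l _ _ => l.length
decreasing_by
  · exact Nat.lt_succ_of_lt (findClose_length _ _ _ _ _ h)
  · simp

def sequence_tokenizer_alt (sequence : String) : List (List String) :=
  seqTokB sequence.toList [] ""

-- ===== PRECONDITION & SPEC =====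
-- Pre_ excludes exactly the inputs on which A raises: a ')' at top level, i.e. some
-- prefix containing more ')' than '('.
def Pre_sequence_tokenizer (sequence : String) : Prop :=
  ∀ p ∈ sequence.toList.inits, p.count ')' ≤ p.count '('
instance (sequence : String) : Decidable (Pre_sequence_tokenizer sequence) := by
  unfold Pre_sequence_tokenizer; infer_instance

def pvWitness_sequence_tokenizer : String := "AB(cd)E(f(g)h)"

def Spec_sequence_tokenizer (sequence : String) (out : List (List String)) : Prop := out = sequence_tokenizer_alt sequence
instance (sequence : String) (out : List (List String)) : Decidable (Spec_sequence_tokenizer sequence out) := by unfold Spec_sequence_tokenizer; infer_instance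

-- ===== CLAIM (what is proved, stated in full; the proofs are below) =====
def Claim_equal_sequence_tokenizer : Prop := ∀ (sequence : String), Dom_sequence_tokenizer sequence → Pre_sequence_tokenizer sequence → Spec_sequence_tokenizer sequence (sequence_tokenizer sequence)

-- ===== LEMMAS AND PROOFS =====

-- Unfolding equation for seqTokB on a top-level '(' (the dependent match needs a lemma).
theorem seqTokB_paren (rest : List Char) (chunks : List (List String)) (ca : String) :
    seqTokB ('(' :: rest) chunks ca =
      match findClose rest 1 "" with
      | none => if ca ≠ "" then chunks ++ [[ca, ""]] else chunks
      | some (m, r) => seqTokB r (chunks ++ [[ca, m]]) "" := by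
  rw [seqTokB]
  cases heq : findClose rest 1 "" with
  | none => simp
  | some v => obtain ⟨m, r⟩ := v; simp

-- In mod state, A's character-by-character accumulation of current_mod computes exactly
-- what findClose returns (same depth test), and the two continuations line up.
theorem seqTokA_mod : ∀ (l : List Char) (chunks : List (List String)) (ca cm : String)
    (pl : Int),
    seqTokA l true chunks ca cm pl =
      match findClose l pl cm with
      | none => if ca ≠ "" then chunks ++ [[ca, ""]] else chunks
      | some (m, r) => seqTokA r false (chunks ++ [[ca, m]]) "" "" 0 := by
  intro l
  induction l with
  | nil => intro chunks ca cm pl; simp [seqTokA, findClose]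
  | cons c rest ih =>
      intro chunks ca cm pl
      by_cases h1 : c = '('
      · subst h1
        simp only [seqTokA, findClose, Bool.not_true, Bool.false_eq_true,
          if_false]
        exact ih _ _ _ _
      · by_cases h2 : c = ')'
        · subst h2
          by_cases h3 : pl - 1 = 0
          · simp [seqTokA, findClose, h1, h3]
          · simp only [seqTokA, findClose]
            simp only [h1, if_false, Bool.not_true, Bool.false_eq_true,
              if_false, h3]
            exact ih _ _ _ _
        · simp only [seqTokA, findClose]
          simp only [h1, h2, if_false, Bool.not_true, Bool.false_eq_true]
          exact ih _ _ _ _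

theorem push_empty_eq (c : Char) : ("".push c) = String.ofList [c] := rfl

theorem main_lemma : ∀ (n : ℕ) (l : List Char), l.length ≤ n →
    ∀ (chunks : List (List String)) (ca : String),
    seqTokA l false chunks ca "" 0 = seqTokB l chunks ca := by
  intro n
  induction n with
  | zero =>
      intro l hl chunks ca
      have : l = [] := List.length_eq_zero_iff.mp (Nat.le_zero.mp hl)
      subst this; simp [seqTokA, seqTokB]
  | succ n ih =>
      intro l hl chunks ca
      match l with
      | [] => simp [seqTokA, seqTokB]
      | c :: rest =>
        have hlen : rest.length ≤ n := by simp at hl; omega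
        by_cases h1 : c = '('
        · subst h1
          rw [seqTokB_paren]
          simp only [seqTokA, Bool.not_false]
          rw [seqTokA_mod]
          have h01 : (0 : Int) + 1 = 1 := by norm_num
          rw [h01]
          cases h : findClose rest 1 "" with
          | none => rfl
          | some v =>
              obtain ⟨m, r⟩ := v
              have hr : r.length ≤ n := by
                have := findClose_length rest 1 "" m r h
                omega
              exact ih r hr _ _
        · by_cases h2 : c = ')'
          · subst h2; simp [seqTokA, seqTokB, h1]
          · by_cases h3 : ca = ""
            · subst h3
              simp only [seqTokA, seqTokB, h1, h2, if_false, Bool.not_false, if_pos,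
                ne_eq, not_true_eq_false, if_false]
              simp only [push_empty_eq]
              rw [ih rest hlen]
            · simp only [seqTokA, seqTokB, h1, h2, if_false, Bool.not_false]
              simp only [ne_eq, h3, not_false_eq_true, if_pos]
              simp only [push_empty_eq]
              rw [ih rest hlen]

-- ===== VERDICT (by name: the statement is the Claim_ definition above) =====
theorem sequence_tokenizer_spec : Claim_equal_sequence_tokenizer := by
  intro sequence _ _
  unfold Spec_sequence_tokenizer sequence_tokenizer sequence_tokenizer_alt
  exact main_lemma sequence.toList.length _ le_rfl _ _
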